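-- pv_equiv track=rewrite | github.com/JavaScript-Algorithm/algorithm-chan | bakejoon/이차원 배열과 연산.py | getNewBlock
-- ===== SOURCE A (Python) =====
-- def getNewBlock(block):
--     filtered = list(filter(lambda x: x != 0, block)) # 1
--     nums = set(filtered)
--     numCount = [] # 2
--     for num in nums:
--         numCount.append([num, block.count(num)])
--     numCount.sort(key=lambda x: (x[1], x[0]))
--     newBlock = [x for y in numCount for x in y]
--     newBlock = newBlock[:100]
--     return newBlock
-- ===== SOURCE B (Python) =====
-- def getNewBlock(block):
--     # sort the nonzero values, then group equal runs in one pass (value, run length)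
--     nonzero = sorted(x for x in block if x != 0)
--     pairs = []
--     rest = nonzero
--     while rest:
--         v = rest[0]
--         k = 1
--         while k < len(rest) and rest[k] == v:
--             k += 1
--         pairs.append((v, k))
--         rest = rest[k:]
--     pairs.sort(key=lambda p: (p[1], p[0]))
--     out = []
--     for v, c in pairs:
--         out.append(v)
--         out.append(c)
--     return out[:100]
-- ===== Notes on version B (the rewrite author's own statement) =====
-- stated objective: faster
-- what changed: Counts come from one sort-then-group run-length pass over the sorted nonzero list instead of a set plus a repeated block.count() rescan per distinct value.
import Mathlib
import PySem

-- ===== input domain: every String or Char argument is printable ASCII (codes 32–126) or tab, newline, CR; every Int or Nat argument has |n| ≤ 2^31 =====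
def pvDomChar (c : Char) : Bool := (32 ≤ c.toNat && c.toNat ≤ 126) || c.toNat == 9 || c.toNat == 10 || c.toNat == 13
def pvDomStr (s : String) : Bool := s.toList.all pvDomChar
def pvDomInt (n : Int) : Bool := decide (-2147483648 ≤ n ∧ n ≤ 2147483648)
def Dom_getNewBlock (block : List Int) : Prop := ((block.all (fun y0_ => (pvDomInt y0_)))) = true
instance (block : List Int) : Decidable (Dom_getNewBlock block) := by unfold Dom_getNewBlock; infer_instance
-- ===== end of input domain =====

-- B replaces A's set + per-value block.count() rescans by one sort-then-group run-length pass (alternative decomposition, same result).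


-- ===== PORT A =====
def getNewBlock (block : List Int) : List Int :=
  let filtered := block.filter (fun x => x != 0)
  let nums := PySem.Set.ofList filtered
  let numCount := nums.foldl (fun acc num => acc ++ [(num, (PySem.List.count block num : Int))]) ([] : List (Int × Int))
  let numCount := PySem.List.sorted2 numCount (fun x => x.2) (fun x => x.1)
  let newBlock := numCount.flatMap (fun y => [y.1, y.2])
  PySem.List.slice newBlock none (some 100)

-- ===== PORT B =====
-- one pass over the sorted list: (run value, run length) for each maximal run
def groupPairs : List Int → List (Int × Int)
  | [] => []
  | x :: xs =>
      (x, 1 + ((xs.takeWhile (fun y => y == x)).length : Int)) ::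
        groupPairs (xs.dropWhile (fun y => y == x))
termination_by l => l.length
decreasing_by
  simpa using Nat.lt_succ_of_le (List.length_dropWhile_le _ _)

def getNewBlock_alt (block : List Int) : List Int :=
  let nonzero := PySem.List.sorted (block.filter (fun x => x != 0)) (fun x => x) false
  let pairs := groupPairs nonzero
  let pairs2 := PySem.List.sorted2 pairs (fun p => p.2) (fun p => p.1)
  let out := pairs2.foldl (fun acc p => acc ++ [p.1, p.2]) ([] : List Int)
  PySem.List.slice out none (some 100)

-- ===== PRECONDITION & SPEC =====
def Spec_getNewBlock (block : List Int) (out : List Int) : Prop := out = getNewBlock_alt block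
instance (block : List Int) (out : List Int) : Decidable (Spec_getNewBlock block out) := by unfold Spec_getNewBlock; infer_instance

-- ===== CLAIM (what is proved, stated in full; the proofs are below) =====
def Claim_equal_getNewBlock : Prop := ∀ (block : List Int), Dom_getNewBlock block → Spec_getNewBlock block (getNewBlock block)

-- ===== LEMMAS AND PROOFS =====

-- the boolean comparator sorted2 uses for key (p.2, p.1)
def ltp (a b : Int × Int) : Bool := decide (a.2 < b.2) || (!decide (b.2 < a.2) && decide (a.1 < b.1))

lemma ltp_trans {a b c : Int × Int} (h1 : ltp a b = true) (h2 : ltp b c = true) : ltp a c = true := by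
  simp [ltp] at *; omega

lemma ltp_total {a b : Int × Int} (h : ltp a b = false) (hne : a ≠ b) : ltp b a = true := by
  have : a.1 ≠ b.1 ∨ a.2 ≠ b.2 := by
    by_contra hc; push Not at hc; exact hne (Prod.ext hc.1 hc.2)
  simp [ltp] at *; omega

lemma ltp_asymm {a b : Int × Int} (h1 : ltp a b = true) (h2 : ltp b a = true) : False := by
  simp [ltp] at *; omega

lemma ins_pairwise (x : Int × Int) (ys : List (Int × Int)) (hx : x ∉ ys)
    (h : ys.Pairwise (fun a b => ltp a b = true)) :
    (PySem.List.insertBy ltp x ys).Pairwise (fun a b => ltp a b = true) := by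
  induction ys with
  | nil => simp [PySem.List.insertBy]
  | cons y ys ih =>
    rw [List.pairwise_cons] at h
    by_cases hxy : ltp x y = true
    · rw [PySem.List.insertBy, if_pos hxy]
      refine List.Pairwise.cons ?_ (List.Pairwise.cons h.1 h.2)
      intro z hz
      rcases List.mem_cons.mp hz with rfl | hz
      · exact hxy
      · exact ltp_trans hxy (h.1 z hz)
    · have hxy' : ltp x y = false := by simpa using hxy
      have hne : x ≠ y := fun he => hx (he ▸ List.mem_cons_self ..)
      rw [PySem.List.insertBy, if_neg (by simp [hxy'])]
      refine List.Pairwise.cons ?_ (ih (fun hm => hx (List.mem_cons_of_mem _ hm)) h.2)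
      intro z hz
      rcases (PySem.List.mem_insertBy ltp x z ys).mp hz with rfl | hz
      · exact ltp_total hxy' hne
      · exact h.1 z hz

lemma foldl_ins_pairwise (xs : List (Int × Int)) : ∀ (acc : List (Int × Int)),
    xs.Nodup → (∀ a ∈ xs, a ∉ acc) → acc.Pairwise (fun a b => ltp a b = true) →
    (xs.foldl (fun acc x => PySem.List.insertBy ltp x acc) acc).Pairwise (fun a b => ltp a b = true) := by
  induction xs with
  | nil => intro acc _ _ hacc; simpa using hacc
  | cons x xs ih =>
    intro acc hnd hdisj hacc
    rw [List.nodup_cons] at hnd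
    refine ih _ hnd.2 ?_ (ins_pairwise x acc (hdisj x (List.mem_cons_self ..)) hacc)
    intro a ha hmem
    rcases (PySem.List.mem_insertBy ltp x a acc).mp hmem with rfl | hm
    · exact hnd.1 ha
    · exact hdisj a (List.mem_cons_of_mem _ ha) hm

lemma sorted2_pairwise (xs : List (Int × Int)) (hnd : xs.Nodup) :
    (PySem.List.sorted2 xs (fun p => p.2) (fun p => p.1) false).Pairwise (fun a b => ltp a b = true) := by
  have : PySem.List.sorted2 xs (fun p => p.2) (fun p => p.1) false
      = xs.foldl (fun acc x => PySem.List.insertBy ltp x acc) [] := rfl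
  rw [this]
  exact foldl_ins_pairwise xs [] hnd (by simp) (by simp)

lemma sorted2_congr_perm (xs ys : List (Int × Int)) (hx : xs.Nodup) (hperm : xs.Perm ys) :
    PySem.List.sorted2 xs (fun p => p.2) (fun p => p.1) false
      = PySem.List.sorted2 ys (fun p => p.2) (fun p => p.1) false := by
  have hy : ys.Nodup := hperm.nodup_iff.mp hx
  refine List.Perm.eq_of_pairwise ?_ (sorted2_pairwise xs hx) (sorted2_pairwise ys hy) ?_
  · intro a b _ _ h1 h2; exact absurd (ltp_asymm h1 h2) (fun f => f)
  · exact (PySem.List.sorted2_perm xs _ _ false).trans (hperm.trans (PySem.List.sorted2_perm ys _ _ false).symm)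

lemma countf (block : List Int) (v : Int) (hv : v ∈ block.filter (fun x => x != 0)) :
    List.count v (block.filter (fun x => x != 0)) = List.count v block :=
  List.count_filter (List.mem_filter.mp hv).2

-- characterisation of B's grouping pass on an ascending list
lemma groupPairs_spec (s : List Int) (hs : s.Pairwise (fun a b => a ≤ b)) :
    (groupPairs s).Nodup ∧
    (∀ p : Int × Int, p ∈ groupPairs s ↔ p.1 ∈ s ∧ p.2 = (s.count p.1 : Int)) := by
  induction s using groupPairs.induct with
  | case1 => simp [groupPairs]
  | case2 x xs ih =>
    set tw := xs.takeWhile (fun y => y == x) with htw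
    set dw := xs.dropWhile (fun y => y == x) with hdw
    have hsplit : xs = tw ++ dw := (List.takeWhile_append_dropWhile).symm
    have htwall : ∀ z ∈ tw, z = x := by
      intro z hz
      have := List.mem_takeWhile_imp hz
      simpa using this
    rw [List.pairwise_cons] at hs
    have hdwpw : dw.Pairwise (fun a b => a ≤ b) :=
      (List.Pairwise.sublist (List.dropWhile_sublist _) hs.2)
    have hxnot : x ∉ dw := by
      intro hmem
      cases hdweq : dw with
      | nil => rw [hdweq] at hmem; simp at hmem
      | cons y t =>
        have hyne : ¬ (y == x) = true := by
          have := List.head?_dropWhile_not (fun y => y == x) xs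
          rw [← hdw, hdweq] at this; simpa using this
        have hyx : y ≠ x := by simpa using hyne
        have hymem : y ∈ xs := hsplit ▸ (List.mem_append_right _ (hdweq ▸ List.mem_cons_self ..))
        have hxy : x ≤ y := hs.1 y hymem
        rw [hdweq] at hmem
        rcases List.mem_cons.mp hmem with rfl | hmem
        · exact hyx rfl
        · rw [hdweq] at hdwpw; rw [List.pairwise_cons] at hdwpw
          have := hdwpw.1 x hmem
          omega
    have hcountx : (x :: xs).count x = 1 + tw.length := by
      rw [List.count_cons_self, hsplit, List.count_append]
      have h1 : tw.count x = tw.length := by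
        rw [List.count_eq_length]; intro z hz; exact (htwall z hz).symm
      have h2 : dw.count x = 0 := List.count_eq_zero.mpr hxnot
      omega
    have hcountother : ∀ v : Int, v ≠ x → (x :: xs).count v = dw.count v := by
      intro v hv
      have htc : tw.count v = 0 := List.count_eq_zero.mpr (fun hm => hv (htwall v hm))
      rw [List.count_cons, hsplit, List.count_append, htc]
      simp [Ne.symm hv]
    obtain ⟨ihnd, ihmem⟩ := ih hdwpw
    constructor
    · rw [groupPairs, List.nodup_cons]
      refine ⟨?_, ihnd⟩
      intro hmem
      have := ((ihmem _).mp hmem).1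
      exact hxnot this
    · intro p
      rw [groupPairs, List.mem_cons, ihmem]
      constructor
      · rintro (rfl | ⟨h1, h2⟩)
        · refine ⟨List.mem_cons_self .., ?_⟩
          simp only [hcountx]; push_cast; ring
        · have hne : p.1 ≠ x := fun he => hxnot (he ▸ h1)
          refine ⟨List.mem_cons_of_mem _ (hsplit ▸ List.mem_append_right _ h1), ?_⟩
          rw [hcountother p.1 hne]; exact h2
      · rintro ⟨h1, h2⟩
        by_cases hpx : p.1 = x
        · left
          have : p.2 = 1 + (tw.length : Int) := by
            rw [h2, hpx, hcountx]; push_cast; ring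
          exact Prod.ext hpx this
        · right
          have hp1xs : p.1 ∈ xs := by
            rcases List.mem_cons.mp h1 with h | h
            · exact absurd h hpx
            · exact h
          have hp1dw : p.1 ∈ dw := by
            have hsplit' : p.1 ∈ tw ++ dw := hsplit ▸ hp1xs
            rcases List.mem_append.mp hsplit' with h | h
            · exact absurd (htwall _ h) hpx
            · exact h
          exact ⟨hp1dw, by rw [h2, hcountother p.1 hpx]⟩

-- ===== VERDICT (by name: the statement is the Claim_ definition above) =====
theorem getNewBlock_spec : Claim_equal_getNewBlock := by
  intro block _
  unfold Spec_getNewBlock getNewBlock getNewBlock_alt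
  simp only []
  set filtered := block.filter (fun x => x != 0) with hfiltered
  set s := PySem.List.sorted filtered (fun x => x) false with hsdef
  -- A's pair list
  rw [PySem.List.foldl_append_singleton_eq_map, List.nil_append]
  set PA := (PySem.Set.ofList filtered).map (fun num => (num, (PySem.List.count block num : Int))) with hPA
  set PB := groupPairs s with hPB
  rw [PySem.List.foldl_append_eq_flatMap, List.nil_append]
  have hspw : s.Pairwise (fun a b : Int => a ≤ b) := by
    simpa using PySem.List.sorted_pairwise filtered (fun x => x)
  obtain ⟨hBnd, hBmem⟩ := groupPairs_spec s hspw
  have hAnd : PA.Nodup := by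
    refine (PySem.Set.nodup_ofList filtered).map ?_
    intro a b h; exact congrArg Prod.fst h
  have hscount : ∀ v : Int, s.count v = filtered.count v := fun v =>
    (PySem.List.sorted_perm filtered (fun x => x) false).count_eq v
  have hAmem : ∀ p : Int × Int, p ∈ PA ↔ p.1 ∈ filtered ∧ p.2 = (filtered.count p.1 : Int) := by
    intro p
    rw [hPA, List.mem_map]
    constructor
    · rintro ⟨v, hv, rfl⟩
      have hvf : v ∈ filtered := (PySem.Set.mem_ofList filtered v).mp hv
      refine ⟨hvf, ?_⟩
      show ((PySem.List.count block v : Nat) : Int) = ((filtered.count v : Nat) : Int)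
      rw [PySem.List.count_eq]
      exact congrArg (fun n : Nat => (n : Int)) (countf block v hvf).symm
    · rintro ⟨h1, h2⟩
      refine ⟨p.1, (PySem.Set.mem_ofList filtered p.1).mpr h1, ?_⟩
      refine Prod.ext rfl ?_
      show ((PySem.List.count block p.1 : Nat) : Int) = p.2
      rw [PySem.List.count_eq, h2]
      exact congrArg (fun n : Nat => (n : Int)) (countf block p.1 h1).symm
  have hperm : PA.Perm PB := by
    rw [List.perm_ext_iff_of_nodup hAnd hBnd]
    intro p
    rw [hAmem p, hBmem p]
    constructor
    · rintro ⟨h1, h2⟩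
      exact ⟨(PySem.List.mem_sorted filtered (fun x => x) false p.1).mpr h1, by rw [h2, hscount]⟩
    · rintro ⟨h1, h2⟩
      exact ⟨(PySem.List.mem_sorted filtered (fun x => x) false p.1).mp h1, by rw [h2, hscount]⟩
  rw [sorted2_congr_perm PA PB hAnd hperm]
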